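-- pv_equiv track=rewrite | github.com/JakubMlocek/ASD-AGH-UST-2020 | sortingAndQuickSelect/AlgorytmySortujace/RadixSort.py | counting_sort_digits
-- ===== SOURCE A (Python) =====
-- def counting_sort_digits(A,letter_num):
--     k = 26 #zakres alfabetu uwzgledniamy tylko małe
--     C = [0] * k
--     B = [0]*len(A)
--     for i in range(len(A)):
--         C[ord(A[i][letter_num]) - ord('a')] += 1
--     for i in range(1, k):
--         C[i] += C[i-1]
--     for i in range(len(A)-1, -1, -1):
--         C[ord(A[i][letter_num]) - ord('a')] -= 1
--         B[C[ord(A[i][letter_num]) - ord('a')]] = A[i]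
--     return B
-- ===== SOURCE B (Python) =====
-- def counting_sort_digits(A, letter_num):
--     buckets = [[] for _ in range(26)]
--     for s in A:
--         buckets[ord(s[letter_num]) - ord('a')].append(s)
--     return [w for bucket in buckets for w in bucket]
-- ===== Notes on version B (the rewrite author's own statement) =====
-- stated objective: simpler
-- what changed: Replaces the three-pass counting sort (histogram, prefix sums, reverse placement into computed slots) with a single forward pass that distributes each string into one of 26 buckets and then concatenates the buckets in order; stability comes from left-to-right appending instead of the prefix-sum/reverse-scan machinery.
import Mathlib
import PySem

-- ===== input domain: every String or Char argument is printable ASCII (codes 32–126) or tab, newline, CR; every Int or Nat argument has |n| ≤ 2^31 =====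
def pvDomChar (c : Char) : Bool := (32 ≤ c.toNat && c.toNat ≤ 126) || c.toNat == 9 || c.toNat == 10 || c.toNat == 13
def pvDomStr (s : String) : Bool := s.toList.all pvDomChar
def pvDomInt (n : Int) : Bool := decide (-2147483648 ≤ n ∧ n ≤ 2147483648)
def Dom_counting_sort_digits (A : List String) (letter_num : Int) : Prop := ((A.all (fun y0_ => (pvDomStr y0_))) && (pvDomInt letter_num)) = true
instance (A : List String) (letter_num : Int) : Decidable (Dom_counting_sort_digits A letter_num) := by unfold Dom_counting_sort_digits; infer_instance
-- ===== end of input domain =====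

-- B replaces A's three-pass counting sort (count, prefix sums, reverse placement into slots)
-- by one forward pass distributing the strings into 26 buckets and concatenating them (simpler).

-- ===== PORT A =====
-- ord(s[letter_num]) - ord('a'); the ' ' default is unreachable under Pre_ (the index is valid there)
def pvOrdS (s : String) (letter_num : Int) : Int :=
  (((PySem.Str.pyGet? s letter_num).getD ' ').toNat : Int) - 97

-- body of A's first loop: C[ord(A[i][letter_num]) - ord('a')] += 1  (Python's negative index wraps: pySetD/pyGetD)
def pvStepCount (letter_num : Int) (A : List String) (C : List Int) (i : Int) : List Int :=
  PySem.List.pySetD C (pvOrdS (PySem.List.pyGetD A i "") letter_num)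
    (PySem.List.pyGetD C (pvOrdS (PySem.List.pyGetD A i "") letter_num) 0 + 1)

-- body of A's second loop: C[i] += C[i-1]
def pvStepPrefix (C : List Int) (i : Int) : List Int :=
  PySem.List.pySetD C i (PySem.List.pyGetD C i 0 + PySem.List.pyGetD C (i - 1) 0)

-- body of A's third loop: C[d] -= 1; B[C[d]] = A[i]
def pvStepPlace (letter_num : Int) (A : List String) (CB : List Int × List (Option String)) (i : Int) :
    List Int × List (Option String) :=
  let d := pvOrdS (PySem.List.pyGetD A i "") letter_num
  let C' := PySem.List.pySetD CB.1 d (PySem.List.pyGetD CB.1 d 0 - 1)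
  (C', PySem.List.pySetD CB.2 (PySem.List.pyGetD C' d 0) (some (PySem.List.pyGetD A i "")))

def counting_sort_digits (A : List String) (letter_num : Int) : List String :=
  -- k = 26; C = [0]*k; B = [0]*len(A)  (the int-0 placeholder is `none`; under Pre_ every slot is overwritten)
  let C : List Int := List.replicate 26 0
  let B : List (Option String) := List.replicate A.length none
  let C := (PySem.List.pyRange 0 (A.length : Int) 1).foldl (pvStepCount letter_num A) C
  let C := (PySem.List.pyRange 1 26 1).foldl pvStepPrefix C
  let CB := (PySem.List.pyRange ((A.length : Int) - 1) (-1) (-1)).foldl (pvStepPlace letter_num A) (C, B)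
  CB.2.map (fun o => o.getD "")

-- ===== PORT B =====
-- buckets[ord(s[letter_num]) - ord('a')].append(s)
def pvStepBucket (letter_num : Int) (bs : List (List String)) (s : String) : List (List String) :=
  PySem.List.pySetD bs (pvOrdS s letter_num) (PySem.List.pyGetD bs (pvOrdS s letter_num) [] ++ [s])

def counting_sort_digits_alt (A : List String) (letter_num : Int) : List String :=
  (A.foldl (pvStepBucket letter_num) (List.replicate 26 [])).flatten

-- ===== PRECONDITION & SPEC =====
-- Exactly the inputs on which the Python A returns (B raises on the same ones): every string has a
-- letter_num-th character and ord(c) - ord('a') lies in [-26, 25], so each C/B/buckets indexing —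
-- including Python's negative-index wraparound — is in range and no IndexError is raised.
def Pre_counting_sort_digits (A : List String) (letter_num : Int) : Prop :=
  ∀ s ∈ A, ((PySem.Str.pyGet? s letter_num).any
    (fun c => decide (71 ≤ c.toNat ∧ c.toNat ≤ 122))) = true
instance (A : List String) (letter_num : Int) : Decidable (Pre_counting_sort_digits A letter_num) := by
  unfold Pre_counting_sort_digits; infer_instance
def pvWitness_counting_sort_digits : List String × Int := (["ba", "ab", "Za"], 0)
def Spec_counting_sort_digits (A : List String) (letter_num : Int) (out : List String) : Prop :=
  out = counting_sort_digits_alt A letter_num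
instance (A : List String) (letter_num : Int) (out : List String) : Decidable (Spec_counting_sort_digits A letter_num out) := by
  unfold Spec_counting_sort_digits; infer_instance

-- ===== CLAIM (what is proved, stated in full; the proofs are below) =====
def Claim_equal_counting_sort_digits : Prop := ∀ (A : List String) (letter_num : Int), Dom_counting_sort_digits A letter_num → Pre_counting_sort_digits A letter_num → Spec_counting_sort_digits A letter_num (counting_sort_digits A letter_num)

-- ===== LEMMAS AND PROOFS =====

-- the resolved bucket index in [0,26) of a string (negative ord(c)-97 wraps by +26)
def pvKey (letter_num : Int) (s : String) : Nat :=
  if ((PySem.Str.pyGet? s letter_num).getD ' ').toNat < 97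
  then ((PySem.Str.pyGet? s letter_num).getD ' ').toNat - 71
  else ((PySem.Str.pyGet? s letter_num).getD ' ').toNat - 97

def pvGood (letter_num : Int) (s : String) : Prop :=
  ∃ c, PySem.Str.pyGet? s letter_num = some c ∧ 71 ≤ c.toNat ∧ c.toNat ≤ 122

def pvFlt (letter_num : Int) (d : Nat) (l : List String) : List String :=
  l.filter (fun s => pvKey letter_num s == d)

def pvCnt (letter_num : Int) (d : Nat) (l : List String) : Nat := (pvFlt letter_num d l).length

def pvFd (letter_num : Int) (D : Nat) (l : List String) : List String :=
  (List.range D).flatMap (fun d => pvFlt letter_num d l)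

def pvLt (letter_num : Int) (d : Nat) (l : List String) : Nat := (pvFd letter_num d l).length

-- position p already holds its final value after the elements of index ≥ m have been placed
def pvPlacedB (letter_num : Int) (A : List String) (m p : Nat) : Bool :=
  (List.range 26).any (fun d =>
    decide (pvLt letter_num d A + pvCnt letter_num d (A.take m) ≤ p) &&
    decide (p < pvLt letter_num d A + pvCnt letter_num d A))

def pvG (letter_num : Int) (A : List String) (m : Nat) : List (Option String) :=
  (List.range A.length).map (fun p =>
    if pvPlacedB letter_num A m p then some ((pvFd letter_num 26 A).getD p "") else none)

def pvCst (letter_num : Int) (A : List String) (m : Nat) : List Int :=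
  (List.range 26).map (fun d => ((pvLt letter_num d A + pvCnt letter_num d (A.take m) : Nat) : Int))

lemma pvGood_of_pre {A : List String} {ln : Int} (h : Pre_counting_sort_digits A ln)
    {s : String} (hs : s ∈ A) : pvGood ln s := by
  have h1 := h s hs
  cases hgd : PySem.Str.pyGet? s ln with
  | none => rw [hgd] at h1; simp [Option.any] at h1
  | some c =>
    rw [hgd] at h1
    simp only [Option.any, decide_eq_true_eq] at h1
    exact ⟨c, hgd, h1.1, h1.2⟩

lemma pvKey_lt {ln : Int} {s : String} (h : pvGood ln s) : pvKey ln s < 26 := by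
  obtain ⟨c, hc, h1, h2⟩ := h
  simp only [pvKey, hc, Option.getD_some]
  split_ifs <;> omega

lemma pyIdx_ord {ln : Int} {s : String} (h : pvGood ln s) :
    PySem.List.pyIdx? 26 (pvOrdS s ln) = some (pvKey ln s) := by
  obtain ⟨c, hc, h1, h2⟩ := h
  simp only [pvOrdS, pvKey, hc, Option.getD_some, PySem.List.pyIdx?]
  split_ifs <;> first | (exfalso; omega) | (congr 1; omega)

lemma pySetD_ord {α : Type} {ln : Int} {s : String} (h : pvGood ln s)
    (xs : List α) (hlen : xs.length = 26) (v : α) :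
    PySem.List.pySetD xs (pvOrdS s ln) v = xs.set (pvKey ln s) v := by
  simp [PySem.List.pySetD, PySem.List.pySet?, hlen, pyIdx_ord h]

lemma pyGetD_ord {α : Type} {ln : Int} {s : String} (h : pvGood ln s)
    (xs : List α) (hlen : xs.length = 26) (x : α) :
    PySem.List.pyGetD xs (pvOrdS s ln) x = xs.getD (pvKey ln s) x := by
  simp [PySem.List.pyGetD, PySem.List.pyGet?, hlen, pyIdx_ord h, List.getD]

-- ---- counting predicates ----

lemma pvFlt_cons (ln : Int) (d : Nat) (s : String) (l : List String) :
    pvFlt ln d (s :: l) = if pvKey ln s = d then s :: pvFlt ln d l else pvFlt ln d l := by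
  by_cases h : pvKey ln s = d <;> simp [pvFlt, h]

lemma pvFd_succ (ln : Int) (D : Nat) (l : List String) :
    pvFd ln (D + 1) l = pvFd ln D l ++ pvFlt ln D l := by
  simp [pvFd, List.range_succ]

lemma pvLt_succ (ln : Int) (D : Nat) (l : List String) :
    pvLt ln (D + 1) l = pvLt ln D l + pvCnt ln D l := by
  simp [pvLt, pvFd_succ, pvCnt]

lemma pvLt_mono (ln : Int) {d e : Nat} (h : d ≤ e) (l : List String) :
    pvLt ln d l ≤ pvLt ln e l := by
  induction e with
  | zero => have : d = 0 := by omega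
            subst this; exact le_refl _
  | succ e ih =>
    rcases Nat.eq_or_lt_of_le h with rfl | h'
    · exact le_refl _
    · have h1 := ih (by omega)
      rw [pvLt_succ]; omega

lemma pvCnt_cons (ln : Int) (d : Nat) (s : String) (l : List String) :
    pvCnt ln d (s :: l) = (if pvKey ln s = d then 1 else 0) + pvCnt ln d l := by
  by_cases h : pvKey ln s = d <;> simp [pvCnt, pvFlt_cons, h] <;> omega

lemma pvLt_cons (ln : Int) (D : Nat) (s : String) (l : List String) :
    pvLt ln D (s :: l) = pvLt ln D l + (if pvKey ln s < D then 1 else 0) := by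
  induction D with
  | zero => simp [pvLt, pvFd]
  | succ D ih =>
    rw [pvLt_succ, pvLt_succ, ih, pvCnt_cons]
    by_cases h2 : pvKey ln s = D
    · rw [if_pos h2, if_neg (by omega), if_pos (by omega)]; omega
    · rw [if_neg h2]
      by_cases h1 : pvKey ln s < D
      · rw [if_pos h1, if_pos (by omega)]; omega
      · rw [if_neg h1, if_neg (by omega)]; omega

lemma pvLt_26 {ln : Int} {l : List String} (h : ∀ s ∈ l, pvGood ln s) :
    pvLt ln 26 l = l.length := by
  induction l with
  | nil => simp [pvLt, pvFd, pvFlt]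
  | cons s t ih =>
    rw [pvLt_cons, ih (fun x hx => h x (List.mem_cons_of_mem _ hx)),
      if_pos (pvKey_lt (h s List.mem_cons_self))]
    simp

lemma pvCover {ln : Int} {l : List String} (D : Nat) {p : Nat} (hp : p < pvLt ln D l) :
    ∃ d, d < D ∧ pvLt ln d l ≤ p ∧ p < pvLt ln d l + pvCnt ln d l := by
  induction D with
  | zero => simp [pvLt, pvFd] at hp
  | succ D ih =>
    rw [pvLt_succ] at hp
    rcases Nat.lt_or_ge p (pvLt ln D l) with h' | h'
    · obtain ⟨d, hd, h1, h2⟩ := ih h'; exact ⟨d, by omega, h1, h2⟩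
    · exact ⟨D, by omega, h', by omega⟩

lemma pvGetFd {ln : Int} {l : List String} {d r : Nat} (hd : d < 26) (hr : r < pvCnt ln d l) :
    (pvFd ln 26 l).getD (pvLt ln d l + r) "" = (pvFlt ln d l).getD r "" := by
  suffices h : ∀ D, d < D → (pvFd ln D l).getD (pvLt ln d l + r) "" = (pvFlt ln d l).getD r "" from
    h 26 hd
  intro D
  induction D with
  | zero => omega
  | succ D ih =>
    intro hD
    rcases Nat.lt_or_ge d D with h' | h'
    · -- the index falls inside the first D buckets
      have hlt : pvLt ln d l + r < pvLt ln D l := by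
        have h1 : pvLt ln d l + r < pvLt ln (d + 1) l := by rw [pvLt_succ]; omega
        have h2 := pvLt_mono ln (show d + 1 ≤ D by omega) l
        omega
      rw [pvFd_succ, List.getD_eq_getElem?_getD, List.getElem?_append_left hlt,
        ← List.getD_eq_getElem?_getD, ih h']
    · -- d = D: the index lands in the appended bucket
      have hdD : d = D := by omega
      subst hdD
      rw [pvFd_succ, List.getD_eq_getElem?_getD,
        List.getElem?_append_right (by simp only [pvLt]; omega)]
      have hidx : pvLt ln d l + r - (pvFd ln d l).length = r := by simp only [pvLt]; omega
      rw [hidx, ← List.getD_eq_getElem?_getD]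

lemma pvCnt_take_succ {ln : Int} {A : List String} {m : Nat} (hm : m < A.length) (d : Nat) :
    pvCnt ln d (A.take (m + 1)) =
      pvCnt ln d (A.take m) + (if pvKey ln (A[m]'hm) = d then 1 else 0) := by
  have h1 : A.take (m + 1) = A.take m ++ [A[m]'hm] := by
    rw [List.take_add_one, List.getElem?_eq_getElem hm]; rfl
  rw [pvCnt, pvFlt, h1, List.filter_append]
  by_cases h : pvKey ln (A[m]'hm) = d <;> simp [pvCnt, pvFlt, h]

lemma pvCnt_take_le (ln : Int) (d m : Nat) (A : List String) :
    pvCnt ln d (A.take m) ≤ pvCnt ln d A := by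
  conv_rhs => rw [← List.take_append_drop m A]
  rw [pvCnt, pvCnt, pvFlt, pvFlt, List.filter_append, List.length_append]
  omega

lemma pvFlt_pos {ln : Int} {A : List String} {m : Nat} (hm : m < A.length)
    {d : Nat} (hk : pvKey ln (A[m]'hm) = d) :
    (pvFlt ln d A).getD (pvCnt ln d (A.take m)) "" = A[m]'hm := by
  have hsplit : pvFlt ln d A
      = pvFlt ln d (A.take m) ++ (A[m]'hm) :: pvFlt ln d (A.drop (m + 1)) := by
    conv_lhs => rw [← List.take_append_drop m A]
    rw [← List.getElem_cons_drop hm, pvFlt, pvFlt, pvFlt, List.filter_append,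
      List.filter_cons_of_pos (by simp [hk])]
  rw [hsplit, List.getD_eq_getElem?_getD]
  have hlen : pvCnt ln d (A.take m) = (pvFlt ln d (A.take m)).length := rfl
  rw [hlen, List.getElem?_append_right (le_refl _), Nat.sub_self]
  simp

lemma getD_set {α : Type} (l : List α) {k : Nat} (hk : k < l.length) (d : Nat) (v x : α) :
    (l.set k v).getD d x = if k = d then v else l.getD d x := by
  rw [List.getD_eq_getElem?_getD, List.getD_eq_getElem?_getD, List.getElem?_set]
  split_ifs <;> simp_all

lemma pvCst_length (ln : Int) (A : List String) (m : Nat) : (pvCst ln A m).length = 26 := by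
  simp [pvCst]

lemma pvCst_getD (ln : Int) (A : List String) (m : Nat) {d : Nat} (hd : d < 26) :
    (pvCst ln A m).getD d 0 = ((pvLt ln d A + pvCnt ln d (A.take m) : Nat) : Int) := by
  simp [pvCst, List.getD_eq_getElem?_getD, List.getElem?_map, List.getElem?_range, hd]

lemma placedB_iff {ln : Int} {A : List String} {m p : Nat} :
    pvPlacedB ln A m p = true ↔ ∃ d, d < 26 ∧
      pvLt ln d A + pvCnt ln d (A.take m) ≤ p ∧ p < pvLt ln d A + pvCnt ln d A := by
  simp [pvPlacedB, List.any_eq_true, List.mem_range]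

-- ---- phase 1 ----

lemma phase1 {ln : Int} : ∀ (l : List String) (C : List Int), C.length = 26 →
    (∀ s ∈ l, pvGood ln s) →
    (l.foldl (fun C s => PySem.List.pySetD C (pvOrdS s ln)
        (PySem.List.pyGetD C (pvOrdS s ln) 0 + 1)) C).length = 26 ∧
    ∀ d, d < 26 → (l.foldl (fun C s => PySem.List.pySetD C (pvOrdS s ln)
        (PySem.List.pyGetD C (pvOrdS s ln) 0 + 1)) C).getD d 0
      = C.getD d 0 + pvCnt ln d l := by
  intro l
  induction l with
  | nil => intro C hC _; exact ⟨hC, fun d _ => by simp [pvCnt, pvFlt]⟩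
  | cons s t ih =>
    intro C hC hg
    have hs : pvGood ln s := hg s List.mem_cons_self
    simp only [List.foldl_cons]
    rw [pyGetD_ord hs C hC, pySetD_ord hs C hC]
    obtain ⟨L, H⟩ := ih (C.set (pvKey ln s) (C.getD (pvKey ln s) 0 + 1))
      (by simp [hC]) (fun x hx => hg x (List.mem_cons_of_mem _ hx))
    refine ⟨L, fun d hd => ?_⟩
    rw [H d hd, getD_set C (by rw [hC]; exact pvKey_lt hs) d _ 0, pvCnt_cons]
    by_cases h : pvKey ln s = d
    · rw [if_pos h, if_pos h, h]; push_cast; ring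
    · rw [if_neg h, if_neg h]; push_cast; ring

-- ---- phase 2 ----

lemma phase2 {ln : Int} {A : List String} : ∀ (m : Nat), m ≤ 26 →
    ∀ (C : List Int), C.length = 26 →
    (∀ d, d < 26 → C.getD d 0 = ((pvCnt ln d A : Nat) : Int)) →
    ((PySem.List.pyRange 1 (m : Int) 1).foldl pvStepPrefix C).length = 26 ∧
    ∀ d, d < 26 → ((PySem.List.pyRange 1 (m : Int) 1).foldl pvStepPrefix C).getD d 0
      = if d < m then ((pvLt ln (d + 1) A : Nat) : Int) else ((pvCnt ln d A : Nat) : Int) := by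
  intro m
  induction m with
  | zero =>
    intro _ C hC hinv
    rw [PySem.List.pyRange_one_eq_nil (by omega)]
    simp only [List.foldl_nil]
    exact ⟨hC, fun d hd => by rw [hinv d hd, if_neg (by omega)]⟩
  | succ m ih =>
    intro hm C hC hinv
    rcases Nat.eq_zero_or_pos m with rfl | hpos
    · rw [PySem.List.pyRange_one_eq_nil (by omega)]
      simp only [List.foldl_nil]
      refine ⟨hC, fun d hd => ?_⟩
      rw [hinv d hd]
      by_cases h : d < 0 + 1
      · have hd0 : d = 0 := by omega
        subst hd0
        rw [if_pos (by omega)]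
        have h1 : pvLt ln 1 A = pvLt ln 0 A + pvCnt ln 0 A := pvLt_succ ln 0 A
        have h0 : pvLt ln 0 A = 0 := by simp [pvLt, pvFd]
        push_cast
        omega
      · rw [if_neg h]
    · have hsplit : PySem.List.pyRange 1 ((m + 1 : Nat) : Int) 1
          = PySem.List.pyRange 1 (m : Int) 1 ++ [(m : Int)] := by
        push_cast
        exact PySem.List.pyRange_one_succ_right (by omega)
      rw [hsplit, List.foldl_append]
      obtain ⟨L, H⟩ := ih (by omega) C hC hinv
      simp only [List.foldl_cons, List.foldl_nil]
      set R := (PySem.List.pyRange 1 (m : Int) 1).foldl pvStepPrefix C with hR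
      have hm26 : m < 26 := by omega
      have hstep : pvStepPrefix R (m : Int)
          = R.set m (R.getD m 0 + R.getD (m - 1) 0) := by
        rw [pvStepPrefix]
        have h1 : ((m : Int) - 1) = ((m - 1 : Nat) : Int) := by push_cast [hpos]; omega
        rw [h1]
        simp
      rw [hstep]
      refine ⟨by simp [L], fun d hd => ?_⟩
      rw [getD_set R (by rw [L]; exact hm26) d _ 0]
      have hRm : R.getD m 0 = ((pvCnt ln m A : Nat) : Int) := by
        rw [H m hm26, if_neg (by omega)]
      have hRm1 : R.getD (m - 1) 0 = ((pvLt ln (m - 1 + 1) A : Nat) : Int) := by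
        rw [H (m - 1) (by omega), if_pos (by omega)]
      by_cases h : m = d
      · subst h
        rw [if_pos rfl, if_pos (by omega), hRm, hRm1]
        have h3 := pvLt_succ ln m A
        have h2 : m - 1 + 1 = m := by omega
        rw [h2]
        omega
      · rw [if_neg h, H d hd]
        by_cases h2 : d < m
        · rw [if_pos h2, if_pos (by omega)]
        · rw [if_neg h2, if_neg (by omega)]

-- ---- phase 3 ----

lemma placeStep {ln : Int} {A : List String} (hA : ∀ s ∈ A, pvGood ln s)
    {m : Nat} (hm : m < A.length) :
    pvStepPlace ln A (pvCst ln A (m + 1), pvG ln A (m + 1)) (m : Int)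
      = (pvCst ln A m, pvG ln A m) := by
  have hgm : pvGood ln (A[m]'hm) := hA _ (A.getElem_mem hm)
  have hAm : PySem.List.pyGetD A (m : Int) "" = A[m]'hm := by
    rw [PySem.List.pyGetD_natCast, List.getD_eq_getElem?_getD, List.getElem?_eq_getElem hm]
    rfl
  have hk26 : pvKey ln (A[m]'hm) < 26 := pvKey_lt hgm
  have hcnt : pvCnt ln (pvKey ln (A[m]'hm)) (A.take (m + 1))
      = pvCnt ln (pvKey ln (A[m]'hm)) (A.take m) + 1 := by
    rw [pvCnt_take_succ hm, if_pos rfl]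
  simp only [pvStepPlace, hAm]
  rw [pyGetD_ord hgm _ (pvCst_length ln A (m + 1)),
    pySetD_ord hgm _ (pvCst_length ln A (m + 1))]
  have hC' : (pvCst ln A (m + 1)).set (pvKey ln (A[m]'hm))
      ((pvCst ln A (m + 1)).getD (pvKey ln (A[m]'hm)) 0 - 1) = pvCst ln A m := by
    apply List.ext_getElem (by simp [pvCst])
    intro i hi hi2
    have hi26 : i < 26 := by simpa [pvCst] using hi2
    rw [List.getElem_set]
    have hgc : ∀ mm, ∀ h : i < (pvCst ln A mm).length,
        (pvCst ln A mm)[i]'h = ((pvLt ln i A + pvCnt ln i (A.take mm) : Nat) : Int) := by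
      intro mm h; simp [pvCst]
    split_ifs with h
    · rw [pvCst_getD ln A (m + 1) hk26, hcnt, h, hgc m hi2]
      push_cast
      ring
    · rw [hgc, hgc, pvCnt_take_succ hm i, if_neg h]
      norm_num
  rw [hC', pyGetD_ord hgm _ (pvCst_length ln A m), pvCst_getD ln A m hk26,
    PySem.List.pySetD_natCast]
  refine Prod.ext rfl ?_
  show (pvG ln A (m + 1)).set (pvLt ln (pvKey ln (A[m]'hm)) A + pvCnt ln (pvKey ln (A[m]'hm)) (A.take m))
      (some (A[m]'hm)) = pvG ln A m
  apply List.ext_getElem (by simp [pvG])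
  intro q hq hq2
  have hqn : q < A.length := by simpa [pvG] using hq2
  have hgG : ∀ mm, ∀ h : q < (pvG ln A mm).length,
      (pvG ln A mm)[q]'h = if pvPlacedB ln A mm q
        then some ((pvFd ln 26 A).getD q "") else none := by
    intro mm h; simp [pvG]
  rw [List.getElem_set, hgG, hgG]
  have hrlt : pvCnt ln (pvKey ln (A[m]'hm)) (A.take m) + 1 ≤ pvCnt ln (pvKey ln (A[m]'hm)) A := by
    rw [← hcnt]; exact pvCnt_take_le ln _ (m + 1) A
  split_ifs with hpq hp1 hp2 hp3 hp4
  · -- q is the freshly placed position and is (correctly) marked placed in pvG m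
    rw [← hpq, pvGetFd hk26 (by omega), pvFlt_pos hm rfl]
  · -- q = place position but pvG m says unplaced: impossible
    exfalso
    have : pvPlacedB ln A m q = true := by
      rw [placedB_iff]
      exact ⟨pvKey ln (A[m]'hm), hk26, by omega, by omega⟩
    exact hp1 this
  · rfl
  · -- q ≠ p*, placed at m+1 but not at m: impossible (monotone)
    exfalso
    rw [placedB_iff] at hp2
    obtain ⟨d, hd, h1, h2⟩ := hp2
    have hmono : pvCnt ln d (A.take m) ≤ pvCnt ln d (A.take (m + 1)) := by
      rw [pvCnt_take_succ hm d]
      split_ifs <;> omega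
    have : pvPlacedB ln A m q = true := by
      rw [placedB_iff]; exact ⟨d, hd, by omega, h2⟩
    exact hp3 this
  · -- q ≠ p*, placed at m but not at m+1: only p* is newly placed, contradiction
    exfalso
    rw [placedB_iff] at hp4
    obtain ⟨d, hd, h1, h2⟩ := hp4
    have hts := pvCnt_take_succ (ln := ln) hm d
    by_cases hkd : pvKey ln (A[m]'hm) = d
    · rw [if_pos hkd] at hts
      subst hkd
      have : pvPlacedB ln A (m + 1) q = true := by
        rw [placedB_iff]
        refine ⟨pvKey ln (A[m]'hm), hd, by omega, h2⟩
      exact hp2 this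
    · rw [if_neg hkd] at hts
      have : pvPlacedB ln A (m + 1) q = true := by
        rw [placedB_iff]; exact ⟨d, hd, by omega, h2⟩
      exact hp2 this
  · rfl

lemma phase3 {ln : Int} {A : List String} (hA : ∀ s ∈ A, pvGood ln s) :
    ∀ (m : Nat), m ≤ A.length →
    ((PySem.List.pyRange ((m : Int) - 1) (-1) (-1)).foldl (pvStepPlace ln A)
        (pvCst ln A m, pvG ln A m)).2 = pvG ln A 0 := by
  intro m
  induction m with
  | zero => intro _; rw [PySem.List.pyRange_neg_one_eq_nil (by omega)]; rfl
  | succ m ih =>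
    intro hm
    have hc : ((m : Int) + 1 - 1) = (m : Int) := by omega
    rw [PySem.List.pyRange_neg_one_cons (by push_cast; omega)]
    push_cast
    rw [hc]
    simp only [List.foldl_cons]
    rw [placeStep hA (by omega)]
    have := ih (by omega)
    push_cast at this ⊢
    convert this using 3

-- ---- endpoints ----

lemma pvG_init {ln : Int} (A : List String) :
    pvG ln A A.length = List.replicate A.length none := by
  apply List.ext_getElem (by simp [pvG])
  intro p h1 h2
  have hfalse : pvPlacedB ln A A.length p = false := by
    rw [Bool.eq_false_iff]
    intro hcontra
    rw [placedB_iff] at hcontra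
    obtain ⟨d, hd, hh1, hh2⟩ := hcontra
    rw [List.take_length] at hh1
    omega
  simp [pvG, hfalse]

lemma pvCst_init {ln : Int} {A : List String} :
    ∀ (C : List Int), C.length = 26 →
    (∀ d, d < 26 → C.getD d 0 = ((pvLt ln (d + 1) A : Nat) : Int)) →
    C = pvCst ln A A.length := by
  intro C hC hinv
  apply List.ext_getElem (by simp [pvCst, hC])
  intro i h1 h2
  have hi : i < 26 := by omega
  have hv := hinv i hi
  rw [List.getD_eq_getElem?_getD, List.getElem?_eq_getElem h1, Option.getD_some] at hv
  rw [hv]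
  simp [pvCst, List.take_length, pvLt_succ]

lemma pvG_final {ln : Int} {A : List String} (hA : ∀ s ∈ A, pvGood ln s) :
    (pvG ln A 0).map (fun o => o.getD "") = pvFd ln 26 A := by
  have hlen : (pvFd ln 26 A).length = A.length := pvLt_26 hA
  apply List.ext_getElem (by simp [pvG, hlen])
  intro p h1 h2
  have hn : p < A.length := by simpa [pvG] using h1
  have hplace : pvPlacedB ln A 0 p = true := by
    rw [placedB_iff]
    have hp26 : p < pvLt ln 26 A := by rw [pvLt_26 hA]; exact hn
    obtain ⟨d, hd, hle, hlt⟩ := pvCover 26 hp26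
    exact ⟨d, hd, by simpa [pvCnt, pvFlt] using hle, hlt⟩
  simp [pvG, hplace, List.getD_eq_getElem?_getD, List.getElem?_eq_getElem h2]

-- ---- B side ----

lemma bside {ln : Int} : ∀ (l : List String) (bs : List (List String)), bs.length = 26 →
    (∀ s ∈ l, pvGood ln s) →
    (l.foldl (pvStepBucket ln) bs).length = 26 ∧
    ∀ d, d < 26 → (l.foldl (pvStepBucket ln) bs).getD d [] = bs.getD d [] ++ pvFlt ln d l := by
  intro l
  induction l with
  | nil => intro bs hbs _; exact ⟨hbs, fun d _ => by simp [pvFlt]⟩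
  | cons s t ih =>
    intro bs hbs hg
    have hs : pvGood ln s := hg s List.mem_cons_self
    simp only [List.foldl_cons, pvStepBucket]
    rw [pyGetD_ord hs bs hbs, pySetD_ord hs bs hbs]
    obtain ⟨L, H⟩ := ih (bs.set (pvKey ln s) (bs.getD (pvKey ln s) [] ++ [s]))
      (by simp [hbs]) (fun x hx => hg x (List.mem_cons_of_mem _ hx))
    refine ⟨L, fun d hd => ?_⟩
    rw [H d hd, getD_set bs (by rw [hbs]; exact pvKey_lt hs) d _ [], pvFlt_cons]
    by_cases h : pvKey ln s = d
    · rw [if_pos h, if_pos h, h]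
      simp
    · rw [if_neg h, if_neg h]

lemma alt_eq {ln : Int} {A : List String} (hA : ∀ s ∈ A, pvGood ln s) :
    counting_sort_digits_alt A ln = pvFd ln 26 A := by
  obtain ⟨L, H⟩ := bside A (List.replicate 26 ([] : List String)) (by simp) hA
  have hbk : A.foldl (pvStepBucket ln) (List.replicate 26 ([] : List String))
      = (List.range 26).map (fun d => pvFlt ln d A) := by
    apply List.ext_getElem (by rw [L]; simp)
    intro i h1 h2
    have hi : i < 26 := by rw [L] at h1; exact h1
    have hv := H i hi
    rw [List.getD_eq_getElem?_getD, List.getElem?_eq_getElem h1, Option.getD_some] at hv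
    have hrep : (List.replicate 26 ([] : List String)).getD i [] = [] := by
      rw [List.getD_eq_getElem?_getD, List.getElem?_replicate]
      simp [hi]
    rw [hv, hrep, List.getElem_map, List.getElem_range]
    simp
  rw [counting_sort_digits_alt, hbk]
  rw [pvFd, ← List.flatMap_def]

lemma a_eq {ln : Int} {A : List String} (hA : ∀ s ∈ A, pvGood ln s) :
    counting_sort_digits A ln = pvFd ln 26 A := by
  simp only [counting_sort_digits]
  rw [show pvStepCount ln A = (fun C i => PySem.List.pySetD C (pvOrdS (PySem.List.pyGetD A i "") ln)
    (PySem.List.pyGetD C (pvOrdS (PySem.List.pyGetD A i "") ln) 0 + 1)) from rfl]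
  rw [PySem.List.foldl_pyRange_zero_pyGetD' A ""
    (fun C s => PySem.List.pySetD C (pvOrdS s ln) (PySem.List.pyGetD C (pvOrdS s ln) 0 + 1))
    (List.replicate 26 0)]
  obtain ⟨L1, H1⟩ := phase1 A (List.replicate 26 0) (by simp) hA
  rw [show (26 : Int) = ((26 : Nat) : Int) by norm_num]
  obtain ⟨L2, H2⟩ := phase2 (ln := ln) (A := A) 26 (le_refl _) _ L1
    (fun d hd => by
      rw [H1 d hd, show (List.replicate 26 (0 : Int)).getD d 0 = 0 from by
        rw [List.getD_eq_getElem?_getD, List.getElem?_replicate]; simp [hd]]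
      simp)
  have hC2 := pvCst_init _ L2 (fun d hd => by rw [H2 d hd, if_pos hd])
  rw [hC2, show (List.replicate A.length (none : Option String)) = pvG ln A A.length
    from (pvG_init A).symm]
  rw [phase3 hA A.length (le_refl _)]
  exact pvG_final hA

-- ===== VERDICT (by name: the statement is the Claim_ definition above) =====
theorem counting_sort_digits_spec : Claim_equal_counting_sort_digits := by
  intro A ln _ hpre
  have hA : ∀ s ∈ A, pvGood ln s := fun s hs => pvGood_of_pre hpre hs
  show counting_sort_digits A ln = counting_sort_digits_alt A ln
  rw [a_eq hA, alt_eq hA]
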